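-- pv_equiv track=rewrite | github.com/ambayu/sovits | webUI.py | _trim_server_logs_for_ui
-- ===== SOURCE A (Python) =====
-- def _is_noise_log_line(line):
--     lowered = (line or "").lower()
--     noisy_tokens = [
--         "pkg_resources is deprecated",
--         "from pkg_resources import",
--         "refain from using this package",
--         "setuptools<81",
--     ]
--     return any(tok in lowered for tok in noisy_tokens)
--
-- def _trim_server_logs_for_ui(lines):
--     cleaned = []
--     for raw in lines:
--         text = (raw or "").strip()
--         if not text:
--             continue
--         if _is_noise_log_line(text):
--             continue
--         cleaned.append(text)
--     if len(cleaned) > 240: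
--         cleaned = cleaned[-240:]
--     return cleaned
-- ===== SOURCE B (Python) =====
-- def _trim_server_logs_for_ui(lines):
--     noisy_tokens = [
--         "pkg_resources is deprecated",
--         "from pkg_resources import",
--         "refain from using this package",
--         "setuptools<81",
--     ]
--     buf = []
--     for raw in reversed(list(lines)):
--         text = (raw or "").strip()
--         if text and not any(tok in text.lower() for tok in noisy_tokens):
--             buf.append(text)
--             if len(buf) == 240:
--                 break
--     buf.reverse()
--     return buf
-- ===== Notes on version B (the rewrite author's own statement) =====
-- stated objective: faster
-- what changed: Replaces 'filter the whole input into a list, then slice off the last 240' with a single back-to-front pass that collects surviving stripped lines into a buffer, stops as soon as 240 survivors are found, and reverses the buffer.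
import Mathlib
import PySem

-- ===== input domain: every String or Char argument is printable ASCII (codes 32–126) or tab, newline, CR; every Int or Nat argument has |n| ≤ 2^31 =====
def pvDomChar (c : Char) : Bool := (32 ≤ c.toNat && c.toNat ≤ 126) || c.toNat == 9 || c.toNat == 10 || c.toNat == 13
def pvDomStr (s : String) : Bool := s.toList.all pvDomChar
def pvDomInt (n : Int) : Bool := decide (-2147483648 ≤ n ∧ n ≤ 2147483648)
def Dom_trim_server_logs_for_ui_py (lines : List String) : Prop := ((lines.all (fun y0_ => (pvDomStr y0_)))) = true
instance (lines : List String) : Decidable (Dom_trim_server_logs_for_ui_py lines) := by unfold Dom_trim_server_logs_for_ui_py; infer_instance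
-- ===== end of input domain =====

-- B replaces A's "filter everything then slice the last 240" with one reverse pass that stops once 240 survivors are collected (measurably faster on long logs).
-- survivors with early stop at 240, then reversing the buffer (alternative decomposition).

-- ===== PORT A =====
def pvNoiseTokens : List String :=
  ["pkg_resources is deprecated", "from pkg_resources import",
   "refain from using this package", "setuptools<81"]

def is_noise_log_line_py (line : String) : Bool :=
  let lowered := PySem.Str.lower line
  pvNoiseTokens.any (fun tok => PySem.Str.isIn tok lowered)

def trim_server_logs_for_ui_py (lines : List String) : List String :=
  let cleaned := lines.foldl (fun cleaned raw =>
    let text := PySem.Str.strip raw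
    if text = "" then cleaned
    else if is_noise_log_line_py text then cleaned
    else cleaned ++ [text]) []
  if cleaned.length > 240 then PySem.List.slice cleaned (some (-240)) none else cleaned

-- ===== PORT B =====
-- reverse pass: append surviving stripped lines to buf, stop once buf holds 240
def pvNoisyTokensB : List String :=
  ["pkg_resources is deprecated", "from pkg_resources import",
   "refain from using this package", "setuptools<81"]

def trim_collect_rev (rev : List String) (buf : List String) : List String :=
  match rev with
  | [] => buf
  | raw :: rest =>
    let text := PySem.Str.strip raw
    if text ≠ "" && !(pvNoisyTokensB.any (fun tok => PySem.Str.isIn tok (PySem.Str.lower text))) then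
      let buf' := buf ++ [text]
      if buf'.length = 240 then buf' else trim_collect_rev rest buf'
    else trim_collect_rev rest buf

def trim_server_logs_for_ui_py_alt (lines : List String) : List String :=
  (trim_collect_rev lines.reverse []).reverse

-- ===== PRECONDITION & SPEC =====
def Spec_trim_server_logs_for_ui_py (lines : List String) (out : List String) : Prop := out = trim_server_logs_for_ui_py_alt lines
instance (lines : List String) (out : List String) : Decidable (Spec_trim_server_logs_for_ui_py lines out) := by unfold Spec_trim_server_logs_for_ui_py; infer_instance

-- ===== CLAIM (what is proved, stated in full; the proofs are below) =====
def Claim_equal_trim_server_logs_for_ui_py : Prop := ∀ (lines : List String), Dom_trim_server_logs_for_ui_py lines → Spec_trim_server_logs_for_ui_py lines (trim_server_logs_for_ui_py lines)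

-- ===== LEMMAS AND PROOFS =====

/-- the common per-line filter: the stripped text, if it survives -/
def pvKeep? (raw : String) : Option String :=
  let text := PySem.Str.strip raw
  if text = "" then none
  else if is_noise_log_line_py text then none
  else some text

lemma trimA_foldl (lines : List String) (acc : List String) :
    lines.foldl (fun cleaned raw =>
      let text := PySem.Str.strip raw
      if text = "" then cleaned
      else if is_noise_log_line_py text then cleaned
      else cleaned ++ [text]) acc = acc ++ lines.filterMap pvKeep? := by
  induction lines generalizing acc with
  | nil => simp
  | cons raw rest ih =>
    simp only [List.foldl_cons, List.filterMap_cons, pvKeep?]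
    split_ifs with h1 h2 <;> simp [ih, pvKeep?]

lemma pvNoisyTokensB_eq : pvNoisyTokensB = pvNoiseTokens := rfl

lemma bool_aux (a : String) (X : Bool) :
    (a ≠ "" && !X) = (if a = "" then (none : Option String) else if X then none else some a).isSome := by
  by_cases h : a = "" <;> cases X <;> simp [h]

lemma keep_cond (raw : String) : (PySem.Str.strip raw ≠ "" &&
    !(pvNoisyTokensB.any (fun tok => PySem.Str.isIn tok (PySem.Str.lower (PySem.Str.strip raw)))))
    = (pvKeep? raw).isSome :=
  (pvNoisyTokensB_eq ▸ bool_aux (PySem.Str.strip raw) _ : _)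

lemma pvKeep?_some {raw t : String} (h : pvKeep? raw = some t) : t = PySem.Str.strip raw := by
  simp only [pvKeep?] at h; split_ifs at h; simp_all

lemma trimB_collect (rev : List String) (buf : List String) (h : buf.length < 240) :
    trim_collect_rev rev buf = buf ++ (rev.filterMap pvKeep?).take (240 - buf.length) := by
  induction rev generalizing buf with
  | nil => simp [trim_collect_rev]
  | cons raw rest ih =>
    simp only [trim_collect_rev, List.filterMap_cons]
    rw [keep_cond]
    cases hk : pvKeep? raw with
    | none => simp only [Option.isSome_none, Bool.false_eq_true, if_false, ih _ h]
    | some t =>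
      rw [← pvKeep?_some hk]
      simp only [Option.isSome_some, if_true]
      by_cases hfull : (buf ++ [t]).length = 240
      · have h1 : 240 - buf.length = 1 := by
          simp only [List.length_append, List.length_cons, List.length_nil] at hfull; omega
        simp [hfull, h1]
      · have hlt : (buf ++ [t]).length < 240 := by
          simp only [List.length_append, List.length_cons, List.length_nil] at hfull ⊢; omega
        rw [if_neg hfull, ih _ hlt]
        have h2 : 240 - buf.length = (240 - (buf ++ [t]).length) + 1 := by
          simp only [List.length_append, List.length_cons, List.length_nil]; omega
        simp [h2]

lemma rev_take_rev (l : List String) (n : Nat) :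
    (l.reverse.take n).reverse = l.drop (l.length - n) := by
  rw [List.take_reverse, List.reverse_reverse]

-- ===== VERDICT (by name: the statement is the Claim_ definition above) =====
theorem trim_server_logs_for_ui_py_spec : Claim_equal_trim_server_logs_for_ui_py := by
  intro lines _
  show trim_server_logs_for_ui_py lines = trim_server_logs_for_ui_py_alt lines
  unfold trim_server_logs_for_ui_py trim_server_logs_for_ui_py_alt
  rw [trimA_foldl, trimB_collect _ _ (by simp)]
  simp only [List.nil_append, List.filterMap_reverse, List.length_nil, Nat.sub_zero,
    rev_take_rev]
  set F := lines.filterMap pvKeep? with hF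
  by_cases h : F.length > 240
  · rw [if_pos h, PySem.List.slice_from_neg_ofNat F 240 (by omega)]
  · rw [if_neg h]
    have : F.length - 240 = 0 := by omega
    simp [this]
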